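-- pv_equiv track=rewrite | github.com/DomPolizzi/loyverse-woocomerce-api | backend/wcapi_inserter.py | determine_product_types
-- ===== SOURCE A (Python) =====
-- def determine_product_types(product_list):
--     """
--     Function to go through a list of products and define their types.
--     Two or more products with the same handle/name are variants of a variable product.
--
--     :param product_list: List of products containing both types of products
--     :return: tuple with a dict containing single products and a dict containing lists of variable products
--     """
--     handle_count = dict()
--     for product in product_list:
--         if product['handle'] not in handle_count:
--             handle_count[product['handle']] = {'count': 1}
--         else:
--             handle_count[product['handle']]['count'] += 1
--
--     # Handles with count greater than one are variable products
--     for handle in handle_count: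
--         if handle_count[handle]['count'] == 1:
--             handle_count[handle]['type'] = 'single'
--         else:
--             handle_count[handle]['type'] = 'variable'
--
--     # Compile dicts
--     # All dicts because it will be easier to append more information to products later
--     single_products = dict()
--     variable_products = dict()
--     for product in product_list:
--         if handle_count[product['handle']]['type'] == 'single':
--             single_products[product['handle']] = product
--         else:
--             # Some data duplication here but these are local dictionaries. Not sure if it's worth it to clean them
--             if product['handle'] in variable_products:
--                 variable_products[product['handle']]['variants'].append(product)
--             else:
--                 variable_products[product['handle']] = {'variants': [product]}
--
--     return single_products, variable_products
-- ===== SOURCE B (Python) =====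
-- def determine_product_types(product_list):
--     """Group products by handle in one pass, then partition the groups."""
--     groups = {}
--     for product in product_list:
--         groups.setdefault(product['handle'], []).append(product)
--
--     single_products = {}
--     variable_products = {}
--     for handle, group in groups.items():
--         if len(group) == 1:
--             single_products[handle] = group[0]
--         else:
--             variable_products[handle] = {'variants': group}
--
--     return single_products, variable_products
-- ===== Notes on version B (the rewrite author's own statement) =====
-- stated objective: simpler
-- what changed: Instead of A's three passes (a count dict over products, a type-labelling pass over that dict, and a partition pass over the products again), B builds a handle->list grouping dict in one pass with setdefault(...).append and partitions the groups in a single pass over the grouping.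
import Mathlib
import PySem

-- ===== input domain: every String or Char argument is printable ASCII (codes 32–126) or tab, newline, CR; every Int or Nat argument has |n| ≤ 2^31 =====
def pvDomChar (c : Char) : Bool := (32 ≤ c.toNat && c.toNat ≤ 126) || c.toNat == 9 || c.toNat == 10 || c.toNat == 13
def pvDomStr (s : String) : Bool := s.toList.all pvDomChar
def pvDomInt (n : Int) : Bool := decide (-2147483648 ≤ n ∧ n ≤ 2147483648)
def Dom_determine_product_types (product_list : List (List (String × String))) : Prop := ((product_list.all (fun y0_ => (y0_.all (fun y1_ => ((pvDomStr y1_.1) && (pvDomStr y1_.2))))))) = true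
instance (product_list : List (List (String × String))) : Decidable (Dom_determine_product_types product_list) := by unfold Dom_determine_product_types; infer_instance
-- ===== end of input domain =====

-- B replaces A's three passes (count dict, type-labelling pass, partition pass over the
-- products) by one grouping pass (handle -> list of products) plus one pass over the groups;
-- objective: simpler.

-- ===== PORT A =====

-- product['handle'] ; Pre_ guarantees the key is present, so the `getD ""` filler is unreachable
def pvHandle (product : List (String × String)) : String :=
  ((PySem.Dict.mk product).get? "handle").getD ""

-- the inner dict {'count': int, 'type': str} of A, as a record ('type' absent until the second loop)
structure PVInfo where
  count : Int
  type : Option String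
deriving Repr, DecidableEq, Inhabited

def determine_product_types (product_list : List (List (String × String))) : (List (String × List (String × String))) × (List (String × List (String × List (List (String × String))))) :=
  -- first loop: count occurrences of each handle
  let handle_count : PySem.Dict String PVInfo :=
    product_list.foldl (fun hc product =>
      if hc.contains (pvHandle product) = false then
        hc.insert (pvHandle product) ⟨1, none⟩
      else
        hc.modify (pvHandle product) ⟨0, none⟩ (fun v => { v with count := v.count + 1 }))
      PySem.Dict.empty
  -- second loop: label each handle 'single' / 'variable'
  let handle_count2 : PySem.Dict String PVInfo :=
    handle_count.keys.foldl (fun hc h =>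
      if (hc.getD h ⟨0, none⟩).count == 1 then
        hc.modify h ⟨0, none⟩ (fun v => { v with type := some "single" })
      else
        hc.modify h ⟨0, none⟩ (fun v => { v with type := some "variable" }))
      handle_count
  -- third loop: compile the two dicts
  let sv :=
    product_list.foldl (fun sv product =>
      if (handle_count2.getD (pvHandle product) ⟨0, none⟩).type == some "single" then
        (sv.1.insert (pvHandle product) product, sv.2)
      else
        if sv.2.contains (pvHandle product) then
          (sv.1, sv.2.modify (pvHandle product) PySem.Dict.empty
                   (fun d => d.modify "variants" [] (fun l => l ++ [product])))
        else
          (sv.1, sv.2.insert (pvHandle product) (PySem.Dict.empty.insert "variants" [product])))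
      ((PySem.Dict.empty : PySem.Dict String (List (String × String))),
       (PySem.Dict.empty : PySem.Dict String (PySem.Dict String (List (List (String × String))))))
  (sv.1.items, sv.2.items.map (fun q => (q.1, q.2.items)))

-- ===== PORT B =====

def determine_product_types_alt (product_list : List (List (String × String))) : (List (String × List (String × String))) × (List (String × List (String × List (List (String × String))))) :=
  -- grouping pass: groups.setdefault(product['handle'], []).append(product)
  let groups : PySem.Dict String (List (List (String × String))) :=
    product_list.foldl (fun g product => g.modify (pvHandle product) [] (fun l => l ++ [product]))
      PySem.Dict.empty
  -- partition pass over the groups; group[0] is `headI` (a group is nonempty when its length is 1)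
  let sv :=
    groups.items.foldl (fun sv hg =>
      if hg.2.length == 1 then
        (sv.1.insert hg.1 hg.2.headI, sv.2)
      else
        (sv.1, sv.2.insert hg.1 (PySem.Dict.empty.insert "variants" hg.2)))
      ((PySem.Dict.empty : PySem.Dict String (List (String × String))),
       (PySem.Dict.empty : PySem.Dict String (PySem.Dict String (List (List (String × String))))))
  (sv.1.items, sv.2.items.map (fun q => (q.1, q.2.items)))

-- ===== PRECONDITION & SPEC =====
-- Pre_ excludes exactly the inputs where product['handle'] raises KeyError in A (a product without a 'handle' key)
def Pre_determine_product_types (product_list : List (List (String × String))) : Prop :=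
  ∀ product ∈ product_list, "handle" ∈ product.map Prod.fst
instance (product_list : List (List (String × String))) : Decidable (Pre_determine_product_types product_list) := by unfold Pre_determine_product_types; infer_instance

def pvWitness_determine_product_types : (List (List (String × String))) :=
  [[("handle", "a")], [("handle", "b"), ("sku", "1")], [("handle", "b")]]

def Spec_determine_product_types (product_list : List (List (String × String))) (out : (List (String × List (String × String))) × (List (String × List (String × List (List (String × String)))))) : Prop := out = determine_product_types_alt product_list
instance (product_list : List (List (String × String))) (out : (List (String × List (String × String))) × (List (String × List (String × List (List (String × String)))))) : Decidable (Spec_determine_product_types product_list out) := by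
  unfold Spec_determine_product_types
  letI : DecidableEq (String × List (List (String × String))) := inferInstance
  letI : DecidableEq (List (String × List (List (String × String)))) := inferInstance
  letI : DecidableEq (String × List (String × List (List (String × String)))) := inferInstance
  letI : DecidableEq (List (String × List (String × List (List (String × String))))) := inferInstance
  infer_instance

-- ===== CLAIM (what is proved, stated in full; the proofs are below) =====
def Claim_equal_determine_product_types : Prop := ∀ (product_list : List (List (String × String))), Dom_determine_product_types product_list → Pre_determine_product_types product_list → Spec_determine_product_types product_list (determine_product_types product_list)

-- ===== LEMMAS AND PROOFS =====

-- B's grouping fold, from an arbitrary start dict (proof-side name for the shared loop shape)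
def pvG (xs : List (List (String × String))) (g : PySem.Dict String (List (List (String × String)))) : PySem.Dict String (List (List (String × String))) :=
  xs.foldl (fun g product => g.modify (pvHandle product) [] (fun l => l ++ [product])) g

-- length of the group of h
def pvLen (g : PySem.Dict String (List (List (String × String)))) (h : String) : Nat :=
  ((g.get? h).map List.length).getD 0

-- number of products with handle h
def pvCnt (xs : List (List (String × String))) (h : String) : Nat :=
  xs.countP (fun p => pvHandle p == h)

-- the type-labelling map of A's second loop
def pvTy (v : PVInfo) : PVInfo := { v with type := some (if v.count == 1 then "single" else "variable") }

theorem pvGetD_len (g : PySem.Dict String (List (List (String × String)))) (h : String) :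
    (g.getD h []).length = ((g.get? h).map List.length).getD 0 := by
  unfold PySem.Dict.getD
  cases hh : g.get? h <;> simp

theorem pvLen_modify (g : PySem.Dict String (List (List (String × String)))) (p : List (String × String)) (h : String) :
    pvLen (g.modify (pvHandle p) [] (fun l => l ++ [p])) h
      = pvLen g h + (if pvHandle p = h then 1 else 0) := by
  unfold PySem.Dict.modify pvLen
  rw [PySem.Dict.get?_insert]
  by_cases heq : h = pvHandle p
  · subst heq
    simp [List.length_append, pvGetD_len]
  · rw [if_neg heq, if_neg (fun e => heq (Eq.symm e))]
    simp

theorem pvCnt_cons (p : List (String × String)) (xs : List (List (String × String))) (h : String) :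
    pvCnt (p :: xs) h = (if pvHandle p = h then 1 else 0) + pvCnt xs h := by
  unfold pvCnt
  rw [List.countP_cons]
  by_cases hp : pvHandle p = h
  · simp [hp]; omega
  · simp [hp]

theorem pvG_cons (p : List (String × String)) (xs : List (List (String × String))) (g : PySem.Dict String (List (List (String × String)))) :
    pvG (p :: xs) g = pvG xs (g.modify (pvHandle p) [] (fun l => l ++ [p])) := rfl

theorem pvG_len (xs : List (List (String × String))) :
    ∀ g h, pvLen (pvG xs g) h = pvLen g h + pvCnt xs h := by
  induction xs with
  | nil => intro g h; simp [pvG, pvCnt]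
  | cons p rest ih =>
      intro g h
      rw [pvG_cons, ih, pvLen_modify, pvCnt_cons]
      omega

theorem pvG_keys_nodup (xs : List (List (String × String))) :
    ∀ g : PySem.Dict String (List (List (String × String))), g.keys.Nodup → (pvG xs g).keys.Nodup := by
  induction xs with
  | nil => intro g hg; exact hg
  | cons p rest ih =>
      intro g hg
      rw [pvG_cons]
      exact ih _ (PySem.Dict.nodup_keys_insert g (pvHandle p) _ hg)

theorem pvG_vals_ne_nil (xs : List (List (String × String))) :
    ∀ g : PySem.Dict String (List (List (String × String))), (∀ q ∈ g.items, q.2 ≠ []) →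
      ∀ q ∈ (pvG xs g).items, q.2 ≠ [] := by
  induction xs with
  | nil => intro g hg; exact hg
  | cons p rest ih =>
      intro g hg
      rw [pvG_cons]
      refine ih _ ?_
      intro q hq
      unfold PySem.Dict.modify at hq
      by_cases hc : g.contains (pvHandle p) = true
      · rw [PySem.Dict.items_insert_of_contains _ _ hc] at hq
        obtain ⟨q0, hq0, hq0eq⟩ := List.mem_map.mp hq
        by_cases hb : (q0.1 == pvHandle p) = true
        · rw [if_pos hb] at hq0eq
          subst hq0eq; simp
        · rw [if_neg (by simp_all)] at hq0eq
          subst hq0eq; exact hg _ hq0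
      · rw [PySem.Dict.items_insert_of_not_contains _ _ (by simp_all)] at hq
        rcases List.mem_append.mp hq with h1 | h2
        · exact hg _ h1
        · simp at h2; subst h2; simp

-- first loop of A, pointwise characterisation against the grouping
theorem loop1_get? (xs : List (List (String × String))) :
    ∀ (hc : PySem.Dict String PVInfo) (g : PySem.Dict String (List (List (String × String)))),
      (∀ h, hc.get? h = (g.get? h).map (fun l => (⟨(l.length : Int), none⟩ : PVInfo))) →
      ∀ h, (xs.foldl (fun hc product =>
              if hc.contains (pvHandle product) = false then
                hc.insert (pvHandle product) ⟨1, none⟩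
              else
                hc.modify (pvHandle product) ⟨0, none⟩ (fun v => { v with count := v.count + 1 })) hc).get? h
            = ((pvG xs g).get? h).map (fun l => (⟨(l.length : Int), none⟩ : PVInfo)) := by
  induction xs with
  | nil => intro hc g hrel h; exact hrel h
  | cons p rest ih =>
      intro hc g hrel h
      rw [List.foldl_cons, pvG_cons]
      have hcon : hc.contains (pvHandle p) = (g.get? (pvHandle p)).isSome := by
        rw [PySem.Dict.contains_eq_isSome_get?, hrel]
        cases g.get? (pvHandle p) <;> simp
      cases hg : g.get? (pvHandle p) with
      | none =>
          rw [hg] at hcon; simp only [Option.isSome_none] at hcon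
          rw [if_pos (by simp [hcon])]
          refine ih _ _ ?_ h
          intro h'
          unfold PySem.Dict.modify
          rw [PySem.Dict.get?_insert, PySem.Dict.get?_insert]
          have hgd : g.getD (pvHandle p) [] = [] := by
            unfold PySem.Dict.getD; rw [hg]; rfl
          by_cases he : h' = pvHandle p
          · simp [he, hgd]
          · simp [he, hrel h']
      | some l =>
          rw [hg] at hcon; simp only [Option.isSome_some] at hcon
          rw [if_neg (by simp [hcon])]
          refine ih _ _ ?_ h
          intro h'
          unfold PySem.Dict.modify
          rw [PySem.Dict.get?_insert, PySem.Dict.get?_insert]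
          have hgd : g.getD (pvHandle p) [] = l := by
            unfold PySem.Dict.getD; rw [hg]; rfl
          have hcd : hc.getD (pvHandle p) ⟨0, none⟩ = ⟨(l.length : Int), none⟩ := by
            unfold PySem.Dict.getD; rw [hrel, hg]; rfl
          by_cases he : h' = pvHandle p
          · simp [he, hgd, hcd]
          · simp [he, hrel h']

-- second loop of A, pointwise characterisation
theorem loop2_get? (ks : List String) :
    ∀ (hc : PySem.Dict String PVInfo), (∀ k ∈ ks, hc.contains k = true) →
      ∀ h, (ks.foldl (fun hc h =>
              if (hc.getD h ⟨0, none⟩).count == 1 then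
                hc.modify h ⟨0, none⟩ (fun v => { v with type := some "single" })
              else
                hc.modify h ⟨0, none⟩ (fun v => { v with type := some "variable" })) hc).get? h
            = if h ∈ ks then (hc.get? h).map pvTy else hc.get? h := by
  induction ks with
  | nil => intro hc _ h; simp
  | cons k ks ih =>
      intro hc hcont h
      have hk : hc.contains k = true := hcont k (List.mem_cons_self)
      rw [PySem.Dict.contains_eq_isSome_get?] at hk
      obtain ⟨v, hv⟩ := Option.isSome_iff_exists.mp hk
      have hgd : hc.getD k ⟨0, none⟩ = v := by
        unfold PySem.Dict.getD; rw [hv]; rfl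
      have hstep : (if (hc.getD k ⟨0, none⟩).count == 1 then
                hc.modify k ⟨0, none⟩ (fun v => { v with type := some "single" })
              else
                hc.modify k ⟨0, none⟩ (fun v => { v with type := some "variable" }))
          = hc.insert k (pvTy v) := by
        unfold PySem.Dict.modify
        rw [hgd]
        by_cases h1 : (v.count == 1) = true
        · rw [if_pos h1]; unfold pvTy; rw [if_pos h1]
        · rw [if_neg h1]; unfold pvTy; rw [if_neg h1]
      rw [List.foldl_cons, hstep]
      have hcont' : ∀ k' ∈ ks, (hc.insert k (pvTy v)).contains k' = true := by
        intro k' hk'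
        rw [PySem.Dict.contains_insert]
        simp [hcont k' (List.mem_cons_of_mem _ hk')]
      rw [ih _ hcont' h, PySem.Dict.get?_insert]
      have hTyTy : pvTy (pvTy v) = pvTy v := by unfold pvTy; simp
      by_cases he : h = k
      · subst he
        by_cases hmem : h ∈ ks
        · simp [hmem, hv, hTyTy]
        · simp [hmem, hv]
      · by_cases hmem : h ∈ ks
        · simp [hmem, he]
        · simp [hmem, he, List.mem_cons]

-- evaluating the inner {'variants': ...} dict updates
theorem pvInner_append (l : List (List (String × String))) (p : List (String × String)) :
    (PySem.Dict.mk [("variants", l)]).modify "variants" [] (fun t => t ++ [p])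
      = PySem.Dict.mk [("variants", l ++ [p])] := by
  simp [PySem.Dict.modify, PySem.Dict.insert, PySem.Dict.getD, PySem.Dict.get?, PySem.Dict.contains]

theorem pvInner_new (p : List (List (String × String))) :
    (PySem.Dict.empty.insert "variants" p : PySem.Dict String (List (List (String × String))))
      = PySem.Dict.mk [("variants", p)] := by
  simp [PySem.Dict.insert, PySem.Dict.empty, PySem.Dict.contains]

-- the third loop of A, with the branch condition abstracted to a predicate on the handle
theorem loop3_items (P : String → Bool) (xs : List (List (String × String))) :
    ∀ (g : PySem.Dict String (List (List (String × String))))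
      (sA : PySem.Dict String (List (String × String)))
      (vA : PySem.Dict String (PySem.Dict String (List (List (String × String))))),
      g.keys.Nodup →
      (∀ q ∈ g.items, q.2 ≠ []) →
      (∀ h, P h = true ↔ pvLen g h + pvCnt xs h = 1) →
      sA.items = (g.items.filter (fun q => P q.1)).map (fun q => (q.1, q.2.headI)) →
      vA.items = (g.items.filter (fun q => !P q.1)).map (fun q => (q.1, PySem.Dict.mk [("variants", q.2)])) →
      (xs.foldl (fun sv product =>
          if P (pvHandle product) then
            (sv.1.insert (pvHandle product) product, sv.2)
          else
            if sv.2.contains (pvHandle product) then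
              (sv.1, sv.2.modify (pvHandle product) PySem.Dict.empty
                       (fun d => d.modify "variants" [] (fun l => l ++ [product])))
            else
              (sv.1, sv.2.insert (pvHandle product) (PySem.Dict.empty.insert "variants" [product]))) (sA, vA))
        = (PySem.Dict.mk (((pvG xs g).items.filter (fun q => P q.1)).map (fun q => (q.1, q.2.headI))),
           PySem.Dict.mk (((pvG xs g).items.filter (fun q => !P q.1)).map (fun q => (q.1, PySem.Dict.mk [("variants", q.2)])))) := by
  induction xs with
  | nil =>
      intro g sA vA _ _ _ H1 H2
      simp only [List.foldl_nil, pvG]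
      rw [← H1, ← H2]
  | cons p rest ih =>
      intro g sA vA Hnd Hne HP H1 H2
      rw [List.foldl_cons, pvG_cons]
      -- keys of the accumulators are among g's keys
      have hsk : sA.keys = (g.items.filter (fun q => P q.1)).map Prod.fst := by
        show sA.items.map Prod.fst = _
        rw [H1, List.map_map]; rfl
      have hvk : vA.keys = (g.items.filter (fun q => !P q.1)).map Prod.fst := by
        show vA.items.map Prod.fst = _
        rw [H2, List.map_map]; rfl
      have hs_sub : sA.keys.Sublist g.keys := by
        rw [hsk]; exact List.Sublist.map Prod.fst List.filter_sublist
      have hv_sub : vA.keys.Sublist g.keys := by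
        rw [hvk]; exact List.Sublist.map Prod.fst List.filter_sublist
      -- the count bookkeeping carries over to the next step
      have HP' : ∀ h, P h = true ↔ pvLen (g.modify (pvHandle p) [] (fun l => l ++ [p])) h + pvCnt rest h = 1 := by
        intro h
        rw [HP h, pvCnt_cons, pvLen_modify]
        omega
      have Hnd' : (g.modify (pvHandle p) [] (fun l => l ++ [p])).keys.Nodup :=
        PySem.Dict.nodup_keys_insert g (pvHandle p) _ Hnd
      have Hne' : ∀ q ∈ (g.modify (pvHandle p) [] (fun l => l ++ [p])).items, q.2 ≠ [] := by
        intro q hq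
        unfold PySem.Dict.modify at hq
        by_cases hc : g.contains (pvHandle p) = true
        · rw [PySem.Dict.items_insert_of_contains _ _ hc] at hq
          obtain ⟨q0, hq0, hq0eq⟩ := List.mem_map.mp hq
          by_cases hb : (q0.1 == pvHandle p) = true
          · rw [if_pos hb] at hq0eq; subst hq0eq; simp
          · rw [if_neg (by simp_all)] at hq0eq; subst hq0eq; exact Hne _ hq0
        · rw [PySem.Dict.items_insert_of_not_contains _ _ (by simp_all)] at hq
          rcases List.mem_append.mp hq with h1 | h2
          · exact Hne _ h1
          · simp at h2; subst h2; simp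
      by_cases hP : P (pvHandle p) = true
      · -- single handle: it cannot be in g yet
        have hlen : pvLen g (pvHandle p) + pvCnt (p :: rest) (pvHandle p) = 1 := (HP _).mp hP
        rw [pvCnt_cons] at hlen
        simp at hlen
        have hlen0 : pvLen g (pvHandle p) = 0 := by omega
        have hgnone : g.get? (pvHandle p) = none := by
          cases hg : g.get? (pvHandle p) with
          | none => rfl
          | some l =>
              exfalso
              have hmem := PySem.Dict.mem_items_of_get?_eq_some g hg
              have := Hne _ hmem
              unfold pvLen at hlen0; rw [hg] at hlen0
              simp at hlen0
              exact this (by simpa using hlen0)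
        have hgc : g.contains (pvHandle p) = false := by
          rw [PySem.Dict.contains_eq_isSome_get?, hgnone]; rfl
        have hsc : sA.contains (pvHandle p) = false := by
          by_contra hcc
          have : sA.contains (pvHandle p) = true := by simpa using hcc
          have hm : pvHandle p ∈ g.keys := hs_sub.subset ((PySem.Dict.contains_iff_mem_keys sA _).mp this)
          rw [← PySem.Dict.contains_iff_mem_keys] at hm
          rw [hgc] at hm; exact Bool.false_ne_true hm
        rw [if_pos hP]
        have hgmod : (g.modify (pvHandle p) [] (fun l => l ++ [p])).items = g.items ++ [(pvHandle p, [p])] := by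
          unfold PySem.Dict.modify
          rw [PySem.Dict.items_insert_of_not_contains _ _ hgc]
          unfold PySem.Dict.getD; rw [hgnone]; rfl
        refine ih _ _ _ Hnd' Hne' HP' ?_ ?_
        · rw [PySem.Dict.items_insert_of_not_contains _ _ hsc, hgmod, List.filter_append, List.map_append, H1]
          simp [hP]
        · rw [hgmod, List.filter_append, List.map_append, H2]
          simp [hP]
      · -- variable handle
        have hPf : P (pvHandle p) = false := by simpa using hP
        rw [if_neg (by simp [hPf])]
        by_cases hgc : g.contains (pvHandle p) = true
        · -- handle already grouped: append to the variants
          rw [PySem.Dict.contains_eq_isSome_get?] at hgc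
          obtain ⟨l, hg⟩ := Option.isSome_iff_exists.mp hgc
          have hmemg : (pvHandle p, l) ∈ g.items := PySem.Dict.mem_items_of_get?_eq_some g hg
          have hmemf : (pvHandle p, l) ∈ g.items.filter (fun q => !P q.1) := by
            rw [List.mem_filter]; exact ⟨hmemg, by simp [hPf]⟩
          have hmemv : (pvHandle p, PySem.Dict.mk [("variants", l)]) ∈ vA.items := by
            rw [H2]
            exact List.mem_map.mpr ⟨(pvHandle p, l), hmemf, rfl⟩
          have hvc : vA.contains (pvHandle p) = true :=
            (PySem.Dict.contains_iff_mem_keys vA _).mpr (PySem.Dict.mem_keys_of_mem_items vA hmemv)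
          have hvnd : vA.keys.Nodup := hv_sub.nodup Hnd
          have hvget : vA.getD (pvHandle p) PySem.Dict.empty = PySem.Dict.mk [("variants", l)] :=
            PySem.Dict.getD_of_mem_items vA hmemv hvnd _
          rw [if_pos hvc]
          have hstep : vA.modify (pvHandle p) PySem.Dict.empty
                   (fun d => d.modify "variants" [] (fun l => l ++ [p]))
              = vA.insert (pvHandle p) (PySem.Dict.mk [("variants", l ++ [p])]) := by
            rw [show vA.modify (pvHandle p) PySem.Dict.empty (fun d => d.modify "variants" [] (fun l => l ++ [p])) = vA.insert (pvHandle p) ((vA.getD (pvHandle p) PySem.Dict.empty).modify "variants" [] (fun t => t ++ [p])) from rfl]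
            rw [hvget, pvInner_append]
          rw [hstep]
          have hgd : g.getD (pvHandle p) [] = l := by
            unfold PySem.Dict.getD; rw [hg]; rfl
          have hgmod : (g.modify (pvHandle p) [] (fun l => l ++ [p])).items
              = g.items.map (fun q => if (q.1 == pvHandle p) = true then (pvHandle p, l ++ [p]) else q) := by
            unfold PySem.Dict.modify
            rw [hgd, PySem.Dict.items_insert_of_contains _ _ (by rw [PySem.Dict.contains_eq_isSome_get?, hg]; rfl)]
          refine ih _ _ _ Hnd' Hne' HP' ?_ ?_
          · -- singles unchanged
            rw [hgmod, List.filter_map, H1]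
            have hfc : (g.items.filter (fun q => P (if (q.1 == pvHandle p) = true then ((pvHandle p, l ++ [p]) : String × List (List (String × String))) else q).1))
                = g.items.filter (fun q => P q.1) := by
              apply List.filter_congr
              intro q _
              by_cases hb : (q.1 == pvHandle p) = true
              · simp only [if_pos hb]
                rw [show q.1 = pvHandle p from by simpa using hb]
              · simp only [if_neg hb]
            rw [show (List.filter ((fun q => P q.1) ∘ fun q => if (q.1 == pvHandle p) = true then ((pvHandle p, l ++ [p]) : String × List (List (String × String))) else q) g.items) = (g.items.filter (fun q => P (if (q.1 == pvHandle p) = true then ((pvHandle p, l ++ [p]) : String × List (List (String × String))) else q).1)) from rfl, hfc, List.map_map]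
            apply List.map_congr_left
            intro q hq
            have hPq : P q.1 = true := (List.mem_filter.mp hq).2
            have hb : (q.1 == pvHandle p) = false := by
              by_contra hbb
              have : q.1 = pvHandle p := by simpa using hbb
              rw [this, hPf] at hPq; exact Bool.false_ne_true hPq
            simp [Function.comp, hb]
          · -- variants get the appended entry
            rw [PySem.Dict.items_insert_of_contains _ _ hvc, H2, hgmod, List.filter_map]
            rw [show (List.filter ((fun q => !P q.1) ∘ fun q => if (q.1 == pvHandle p) = true then ((pvHandle p, l ++ [p]) : String × List (List (String × String))) else q) g.items) = (g.items.filter (fun q => (!P (if (q.1 == pvHandle p) = true then ((pvHandle p, l ++ [p]) : String × List (List (String × String))) else q).1))) from rfl]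
            have hfc : (g.items.filter (fun q => (!P (if (q.1 == pvHandle p) = true then ((pvHandle p, l ++ [p]) : String × List (List (String × String))) else q).1)))
                = g.items.filter (fun q => !P q.1) := by
              apply List.filter_congr
              intro q _
              by_cases hb : (q.1 == pvHandle p) = true
              · simp only [if_pos hb]
                rw [show q.1 = pvHandle p from by simpa using hb]
              · simp only [if_neg hb]
            rw [hfc, List.map_map, List.map_map]
            apply List.map_congr_left
            intro q hq
            by_cases hb : (q.1 == pvHandle p) = true <;> simp [Function.comp, hb]
        · -- first product of a variable handle
          have hgcf : g.contains (pvHandle p) = false := by simpa using hgc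
          have hvc : vA.contains (pvHandle p) = false := by
            by_contra hcc
            have : vA.contains (pvHandle p) = true := by simpa using hcc
            have hm : pvHandle p ∈ g.keys := hv_sub.subset ((PySem.Dict.contains_iff_mem_keys vA _).mp this)
            rw [← PySem.Dict.contains_iff_mem_keys, hgcf] at hm
            exact Bool.false_ne_true hm
          rw [if_neg (by simp [hvc])]
          have hgnone : g.get? (pvHandle p) = none := by
            rw [PySem.Dict.contains_eq_isSome_get?] at hgcf
            cases hg : g.get? (pvHandle p)
            · rfl
            · rw [hg] at hgcf; simp at hgcf
          have hgmod : (g.modify (pvHandle p) [] (fun l => l ++ [p])).items = g.items ++ [(pvHandle p, [p])] := by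
            unfold PySem.Dict.modify
            rw [PySem.Dict.items_insert_of_not_contains _ _ hgcf]
            unfold PySem.Dict.getD; rw [hgnone]; rfl
          refine ih _ _ _ Hnd' Hne' HP' ?_ ?_
          · rw [hgmod, List.filter_append, List.map_append, H1]
            simp [hPf]
          · rw [PySem.Dict.items_insert_of_not_contains _ _ hvc, hgmod, List.filter_append, List.map_append, H2]
            simp [hPf, pvInner_new]

-- B's partition pass over a nodup-keyed item list is filter-and-map
theorem loopB_items (items : List (String × List (List (String × String)))) :
    ∀ (sB : PySem.Dict String (List (String × String)))
      (vB : PySem.Dict String (PySem.Dict String (List (List (String × String))))),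
      (∀ q ∈ items, sB.contains q.1 = false ∧ vB.contains q.1 = false) →
      (items.map Prod.fst).Nodup →
      (items.foldl (fun sv hg =>
          if hg.2.length == 1 then
            (sv.1.insert hg.1 hg.2.headI, sv.2)
          else
            (sv.1, sv.2.insert hg.1 (PySem.Dict.empty.insert "variants" hg.2))) (sB, vB))
        = (PySem.Dict.mk (sB.items ++ (items.filter (fun q => q.2.length == 1)).map (fun q => (q.1, q.2.headI))),
           PySem.Dict.mk (vB.items ++ (items.filter (fun q => !(q.2.length == 1))).map (fun q => (q.1, PySem.Dict.mk [("variants", q.2)])))) := by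
  induction items with
  | nil => intro sB vB _ _; simp
  | cons q rest ih =>
      intro sB vB hfresh hnd
      have hq := hfresh q List.mem_cons_self
      have hnd' : (rest.map Prod.fst).Nodup := (List.nodup_cons.mp hnd).2
      have hqn : q.1 ∉ rest.map Prod.fst := (List.nodup_cons.mp hnd).1
      rw [List.foldl_cons]
      by_cases h1 : (q.2.length == 1) = true
      · rw [if_pos h1]
        have hfresh' : ∀ r ∈ rest, (sB.insert q.1 q.2.headI).contains r.1 = false ∧ vB.contains r.1 = false := by
          intro r hr
          refine ⟨?_, (hfresh r (List.mem_cons_of_mem _ hr)).2⟩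
          rw [PySem.Dict.contains_insert]
          have : (r.1 == q.1) = false := by
            by_contra hb
            exact hqn (by
              have : r.1 = q.1 := by simpa using hb
              rw [← this]; exact List.mem_map.mpr ⟨r, hr, rfl⟩)
          rw [this, (hfresh r (List.mem_cons_of_mem _ hr)).1]
          rfl
        rw [ih _ _ hfresh' hnd']
        rw [PySem.Dict.items_insert_of_not_contains _ _ hq.1]
        simp [h1]
      · rw [if_neg h1]
        have hfresh' : ∀ r ∈ rest, sB.contains r.1 = false ∧ (vB.insert q.1 (PySem.Dict.empty.insert "variants" q.2)).contains r.1 = false := by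
          intro r hr
          refine ⟨(hfresh r (List.mem_cons_of_mem _ hr)).1, ?_⟩
          rw [PySem.Dict.contains_insert]
          have : (r.1 == q.1) = false := by
            by_contra hb
            exact hqn (by
              have : r.1 = q.1 := by simpa using hb
              rw [← this]; exact List.mem_map.mpr ⟨r, hr, rfl⟩)
          rw [this, (hfresh r (List.mem_cons_of_mem _ hr)).2]
          rfl
        rw [ih _ _ hfresh' hnd']
        rw [PySem.Dict.items_insert_of_not_contains _ _ hq.2]
        simp [h1, pvInner_new]

-- ===== VERDICT (by name: the statement is the Claim_ definition above) =====
theorem determine_product_types_spec : Claim_equal_determine_product_types := by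
  intro product_list _ _
  unfold Spec_determine_product_types determine_product_types determine_product_types_alt
  simp only []
  set hc1 : PySem.Dict String PVInfo := (product_list.foldl (fun hc product =>
      if hc.contains (pvHandle product) = false then
        hc.insert (pvHandle product) ⟨1, none⟩
      else
        hc.modify (pvHandle product) ⟨0, none⟩ (fun v => { v with count := v.count + 1 }))
      PySem.Dict.empty) with hhc1
  set hc2 : PySem.Dict String PVInfo := (hc1.keys.foldl (fun hc h =>
      if (hc.getD h ⟨0, none⟩).count == 1 then
        hc.modify h ⟨0, none⟩ (fun v => { v with type := some "single" })
      else
        hc.modify h ⟨0, none⟩ (fun v => { v with type := some "variable" }))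
      hc1) with hhc2
  -- facts about the grouping
  have hGFnd : (pvG product_list PySem.Dict.empty).keys.Nodup :=
    pvG_keys_nodup product_list PySem.Dict.empty (by simp [PySem.Dict.keys, PySem.Dict.empty])
  have hGFne : ∀ q ∈ (pvG product_list PySem.Dict.empty).items, q.2 ≠ [] :=
    pvG_vals_ne_nil product_list PySem.Dict.empty (by simp [PySem.Dict.empty])
  have hGFlen : ∀ h, pvLen (pvG product_list PySem.Dict.empty) h = pvCnt product_list h := by
    intro h
    rw [pvG_len]
    simp [pvLen, PySem.Dict.get?, PySem.Dict.empty]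
  -- the single/variable predicate
  set P : String → Bool := fun h => pvCnt product_list h == 1 with hPdef
  -- first loop characterisation
  have h1 : ∀ h, hc1.get? h = ((pvG product_list PySem.Dict.empty).get? h).map (fun l => (⟨(l.length : Int), none⟩ : PVInfo)) := by
    intro h
    rw [hhc1]
    exact loop1_get? product_list PySem.Dict.empty PySem.Dict.empty
      (by intro h'; simp [PySem.Dict.get?, PySem.Dict.empty]) h
  -- second loop characterisation
  have h2 : ∀ h, hc2.get? h = if h ∈ hc1.keys then (hc1.get? h).map pvTy else hc1.get? h := by
    intro h
    rw [hhc2]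
    exact loop2_get? hc1.keys hc1 (fun k hk => (PySem.Dict.contains_iff_mem_keys hc1 k).mpr hk) h
  -- the branch condition of the third loop is P on every product of the list
  have hcond : ∀ p ∈ product_list, ((hc2.getD (pvHandle p) ⟨0, none⟩).type == some "single") = P (pvHandle p) := by
    intro p hp
    have hcnt : 0 < pvCnt product_list (pvHandle p) := by
      unfold pvCnt
      rw [List.countP_pos_iff]; exact ⟨p, hp, by simp⟩
    obtain ⟨l, hg⟩ : ∃ l, (pvG product_list PySem.Dict.empty).get? (pvHandle p) = some l := by
      cases hgg : (pvG product_list PySem.Dict.empty).get? (pvHandle p) with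
      | none =>
          exfalso
          have := hGFlen (pvHandle p)
          unfold pvLen at this; rw [hgg] at this
          simp at this; omega
      | some l => exact ⟨l, rfl⟩
    have hlen : l.length = pvCnt product_list (pvHandle p) := by
      have := hGFlen (pvHandle p)
      unfold pvLen at this; rw [hg] at this
      simpa using this
    have hk : pvHandle p ∈ hc1.keys := by
      rw [← PySem.Dict.contains_iff_mem_keys, PySem.Dict.contains_eq_isSome_get?, h1, hg]
      rfl
    have hv2 : hc2.get? (pvHandle p) = some (pvTy ⟨(l.length : Int), none⟩) := by
      rw [h2, if_pos hk, h1, hg]; rfl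
    have hgd : hc2.getD (pvHandle p) ⟨0, none⟩ = pvTy ⟨(l.length : Int), none⟩ := by
      unfold PySem.Dict.getD; rw [hv2]; rfl
    rw [hgd]
    unfold pvTy
    by_cases hone : l.length = 1
    · have hb : (((l.length : Int)) == 1) = true := by simp [hone]
      simp only [hb]
      simp [hPdef, ← hlen, hone]
    · have hb : (((l.length : Int)) == 1) = false := by
        simp only [beq_eq_false_iff_ne, ne_eq]
        exact_mod_cast fun hx => hone (by exact_mod_cast hx)
      have hvs : ((some "variable" : Option String) == some "single") = false := by decide
      simp [hb, hPdef, ← hlen, hone, hvs]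
  -- rewrite A's third loop to the P-version, and evaluate both loops
  have hA3 : (product_list.foldl (fun sv product =>
      if (hc2.getD (pvHandle product) ⟨0, none⟩).type == some "single" then
        (sv.1.insert (pvHandle product) product, sv.2)
      else
        if sv.2.contains (pvHandle product) then
          (sv.1, sv.2.modify (pvHandle product) PySem.Dict.empty
                   (fun d => d.modify "variants" [] (fun l => l ++ [product])))
        else
          (sv.1, sv.2.insert (pvHandle product) (PySem.Dict.empty.insert "variants" [product])))
      ((PySem.Dict.empty : PySem.Dict String (List (String × String))),
       (PySem.Dict.empty : PySem.Dict String (PySem.Dict String (List (List (String × String)))))))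
      = (product_list.foldl (fun sv product =>
          if P (pvHandle product) then
            (sv.1.insert (pvHandle product) product, sv.2)
          else
            if sv.2.contains (pvHandle product) then
              (sv.1, sv.2.modify (pvHandle product) PySem.Dict.empty
                       (fun d => d.modify "variants" [] (fun l => l ++ [product])))
            else
              (sv.1, sv.2.insert (pvHandle product) (PySem.Dict.empty.insert "variants" [product])))
          ((PySem.Dict.empty : PySem.Dict String (List (String × String))),
           (PySem.Dict.empty : PySem.Dict String (PySem.Dict String (List (List (String × String)))))))  := by
    apply PySem.List.foldl_congr_mem
    intro acc p hp
    rw [hcond p hp]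
  have hA := loop3_items P product_list PySem.Dict.empty PySem.Dict.empty PySem.Dict.empty
      (by simp [PySem.Dict.keys, PySem.Dict.empty])
      (by simp [PySem.Dict.empty])
      (by
        intro h
        have h0 : pvLen PySem.Dict.empty h = 0 := by simp [pvLen, PySem.Dict.get?, PySem.Dict.empty]
        rw [h0, hPdef]
        simp)
      (by simp [PySem.Dict.empty])
      (by simp [PySem.Dict.empty])
  -- B's grouping pass is pvG
  rw [show (product_list.foldl (fun g product => g.modify (pvHandle product) [] (fun l => l ++ [product])) PySem.Dict.empty) = pvG product_list PySem.Dict.empty from rfl]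
  have hB := loopB_items (pvG product_list PySem.Dict.empty).items PySem.Dict.empty PySem.Dict.empty
      (by intro q _; constructor <;> simp [PySem.Dict.contains, PySem.Dict.empty])
      hGFnd
  -- the two filter predicates agree on the grouping's items
  have hfiltS : (pvG product_list PySem.Dict.empty).items.filter (fun q => q.2.length == 1)
      = (pvG product_list PySem.Dict.empty).items.filter (fun q => P q.1) := by
    apply List.filter_congr
    intro q hq
    have hgq : (pvG product_list PySem.Dict.empty).get? q.1 = some q.2 :=
      PySem.Dict.get?_of_mem_items _ (by exact hq) hGFnd
    have hl : q.2.length = pvCnt product_list q.1 := by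
      have h0 := hGFlen q.1
      unfold pvLen at h0; rw [hgq] at h0
      simpa using h0
    rw [hPdef]; simp [hl]
  have hfiltV : (pvG product_list PySem.Dict.empty).items.filter (fun q => !(q.2.length == 1))
      = (pvG product_list PySem.Dict.empty).items.filter (fun q => !P q.1) := by
    apply List.filter_congr
    intro q hq
    have hgq : (pvG product_list PySem.Dict.empty).get? q.1 = some q.2 :=
      PySem.Dict.get?_of_mem_items _ (by exact hq) hGFnd
    have hl : q.2.length = pvCnt product_list q.1 := by
      have h0 := hGFlen q.1
      unfold pvLen at h0; rw [hgq] at h0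
      simpa using h0
    rw [hPdef]; simp [hl]
  rw [hA3, hA, hB, hfiltS, hfiltV]
  simp [PySem.Dict.empty]
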